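-- pv_equiv track=rewrite | github.com/gonzalopezgil/archi-scraper | scripts/html_to_archimate_xml.py | build_nesting_tree
-- ===== SOURCE A (Python) =====
-- def build_nesting_tree(coordinates):
--     """
--     Determine nesting by checking if one box is completely inside another.
--     Returns a dict mapping element_id -> parent_id (or None for top-level).
--     """
--     parent_map = {}
--     items = list(coordinates.items())
--
--     for elem_id, coords in items:
--         parent_map[elem_id] = None
--         best_parent = None
--         best_parent_area = float('inf')
--
--         for other_id, other_coords in items:
--             if elem_id == other_id:
--                 continue
--
--             # Check if elem is inside other
--             if is_inside(coords, other_coords):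
--                 other_area = other_coords['w'] * other_coords['h']
--                 # Choose the smallest containing parent (most direct parent)
--                 if other_area < best_parent_area:
--                     best_parent = other_id
--                     best_parent_area = other_area
--
--         parent_map[elem_id] = best_parent
--
--     return parent_map
--
-- def is_inside(inner, outer):
--     """Check if inner box is completely inside outer box."""
--     return (inner['x'] >= outer['x'] and
--             inner['y'] >= outer['y'] and
--             inner['x2'] <= outer['x2'] and
--             inner['y2'] <= outer['y2'])
-- ===== SOURCE B (Python) =====
-- def is_inside(inner, outer):
--     """Check if inner box is completely inside outer box."""
--     return (inner['x'] >= outer['x'] and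
--             inner['y'] >= outer['y'] and
--             inner['x2'] <= outer['x2'] and
--             inner['y2'] <= outer['y2'])
--
-- def area(coords):
--     # .get defaults keep the sort key total; a box missing 'w'/'h' is never a
--     # containing box on admitted inputs, so its sort position is irrelevant.
--     return coords.get('w', 0) * coords.get('h', 0)
--
-- def build_nesting_tree(coordinates):
--     """
--     Sort the boxes once, stably, by area ascending; each element's parent is
--     then the FIRST box in that order (other than itself) that contains it:
--     that is the smallest containing box, ties going to the earliest original
--     box, and None when nothing contains it.
--     """
--     items = list(coordinates.items())
--     by_area = sorted(items, key=lambda kv: area(kv[1]))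
--     parent_map = {}
--     for eid, c in items:
--         parent = None
--         for oid, oc in by_area:
--             if oid != eid and is_inside(c, oc):
--                 parent = oid
--                 break
--         parent_map[eid] = parent
--     return parent_map
-- ===== Notes on version B (the rewrite author's own statement) =====
-- stated objective: alternative
-- what changed: Instead of A's per-element running minimum over all boxes (best_parent/best_parent_area with float('inf')), B sorts the boxes once, stably, by area ascending and assigns each element the first containing box in that order with an early break; stability plus A's strict-< update rule make the two tie-breaks coincide.
import Mathlib
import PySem

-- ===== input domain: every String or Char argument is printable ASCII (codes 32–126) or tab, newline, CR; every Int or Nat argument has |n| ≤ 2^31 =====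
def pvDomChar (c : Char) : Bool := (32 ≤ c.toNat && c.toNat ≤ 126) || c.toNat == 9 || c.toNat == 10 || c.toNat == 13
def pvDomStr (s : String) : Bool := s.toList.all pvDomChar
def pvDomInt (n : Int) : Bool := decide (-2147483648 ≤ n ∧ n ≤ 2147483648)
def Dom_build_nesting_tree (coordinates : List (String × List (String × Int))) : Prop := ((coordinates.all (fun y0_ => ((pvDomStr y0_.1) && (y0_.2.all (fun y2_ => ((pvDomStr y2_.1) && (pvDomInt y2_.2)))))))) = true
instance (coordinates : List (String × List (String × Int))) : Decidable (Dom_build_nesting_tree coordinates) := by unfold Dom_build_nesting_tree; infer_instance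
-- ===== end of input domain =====

-- B replaces A's per-element running-minimum scan by one stable sort of the boxes by
-- area ascending plus a first-containing-box scan with early exit (objective: alternative).

-- ===== PORT A =====
-- coords['k'] for the inner box dicts; the default 0 is only read where Python's short-circuit
-- 'and' never evaluates the lookup (missing evaluated keys raise KeyError in Python: those
-- inputs are excluded by Pre_ below, where A raises)
def pvGet (c : List (String × Int)) (k : String) : Int := (PySem.Dict.mk c).getD k 0

-- helper is_inside, shared source of both Source A and Source B
def pvIsInside (inner outer : List (String × Int)) : Bool :=
  decide (pvGet inner "x" ≥ pvGet outer "x") &&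
  decide (pvGet inner "y" ≥ pvGet outer "y") &&
  decide (pvGet inner "x2" ≤ pvGet outer "x2") &&
  decide (pvGet inner "y2" ≤ pvGet outer "y2")

-- body of A's inner 'for other_id, other_coords in items' loop; state = (best_parent, best_parent_area),
-- best_parent_area none = float('inf')
def pvBestStep (eid : String) (c : List (String × Int))
    (st : Option String × Option Int) (other : String × List (String × Int)) :
    Option String × Option Int :=
  if other.1 == eid then st
  else if pvIsInside c other.2 then
    let area := pvGet other.2 "w" * pvGet other.2 "h"
    if (match st.2 with | none => true | some ba => decide (area < ba)) then
      (some other.1, some area)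
    else st
  else st

def build_nesting_tree (coordinates : List (String × List (String × Int))) :
    List (String × Option String) :=
  (coordinates.foldl (fun pm it =>
      let pm1 := pm.insert it.1 (none : Option String)
      let best := coordinates.foldl (pvBestStep it.1 it.2) (none, none)
      pm1.insert it.1 best.1)
    PySem.Dict.empty).items

-- ===== PORT B =====
-- Source B's area helper: coords.get('w', 0) * coords.get('h', 0)
def pvArea (c : List (String × Int)) : Int := pvGet c "w" * pvGet c "h"

def build_nesting_tree_alt (coordinates : List (String × List (String × Int))) :
    List (String × Option String) :=
  let byArea := PySem.List.sorted coordinates (fun kv => pvArea kv.2)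
  (coordinates.foldl (fun pm it =>
      pm.insert it.1
        ((byArea.find? (fun kv => !(kv.1 == it.1) && pvIsInside it.2 kv.2)).map (fun kv => kv.1)))
    PySem.Dict.empty).items

-- ===== PRECONDITION & SPEC =====
-- Pre_ excludes association lists with duplicate keys (outer or inner), on which the Python
-- dict inputs collapse entries so the list ports cannot reproduce dict semantics, and inputs
-- on which A raises KeyError: some pair of distinct boxes is missing a key that the
-- short-circuit evaluation of is_inside (and, for a containing box, the w/h area lookup)
-- would evaluate.
def pvHasKey (c : List (String × Int)) (k : String) : Prop := k ∈ c.map (·.1)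
def Pre_build_nesting_tree (coordinates : List (String × List (String × Int))) : Prop :=
  (coordinates.map (·.1)).Nodup ∧
  (∀ p ∈ coordinates, (p.2.map (·.1)).Nodup) ∧
  (∀ e ∈ coordinates, ∀ o ∈ coordinates, e.1 ≠ o.1 →
    pvHasKey e.2 "x" ∧ pvHasKey o.2 "x" ∧
    (pvGet e.2 "x" ≥ pvGet o.2 "x" →
      pvHasKey e.2 "y" ∧ pvHasKey o.2 "y" ∧
      (pvGet e.2 "y" ≥ pvGet o.2 "y" →
        pvHasKey e.2 "x2" ∧ pvHasKey o.2 "x2" ∧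
        (pvGet e.2 "x2" ≤ pvGet o.2 "x2" →
          pvHasKey e.2 "y2" ∧ pvHasKey o.2 "y2" ∧
          (pvGet e.2 "y2" ≤ pvGet o.2 "y2" →
            pvHasKey o.2 "w" ∧ pvHasKey o.2 "h")))))
instance (coordinates : List (String × List (String × Int))) : Decidable (Pre_build_nesting_tree coordinates) := by unfold Pre_build_nesting_tree pvHasKey; infer_instance

def pvWitness_build_nesting_tree : (List (String × List (String × Int))) :=
  [("a", [("x", 0), ("y", 0), ("x2", 2), ("y2", 2), ("w", 2), ("h", 2)]),
   ("b", [("x", 0), ("y", 0), ("x2", 1), ("y2", 1), ("w", 1), ("h", 1)])]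

def Spec_build_nesting_tree (coordinates : List (String × List (String × Int))) (out : List (String × Option String)) : Prop := out = build_nesting_tree_alt coordinates
instance (coordinates : List (String × List (String × Int))) (out : List (String × Option String)) : Decidable (Spec_build_nesting_tree coordinates out) := by unfold Spec_build_nesting_tree; infer_instance

-- ===== CLAIM (what is proved, stated in full; the proofs are below) =====
def Claim_equal_build_nesting_tree : Prop := ∀ (coordinates : List (String × List (String × Int))), Dom_build_nesting_tree coordinates → Pre_build_nesting_tree coordinates → Spec_build_nesting_tree coordinates (build_nesting_tree coordinates)

-- ===== LEMMAS AND PROOFS =====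

-- A's strict-< running minimum, phrased on the element it keeps
def pvMinStep {α : Type} (p : α → Bool) (key : α → Int)
    (st : Option α) (x : α) : Option α :=
  if p x then
    match st with
    | none => some x
    | some y => if key x < key y then some x else some y
  else st

-- A's pair-state inner loop is the element-state running minimum, packed
def pvPack (st : Option (String × List (String × Int))) : Option String × Option Int :=
  match st with
  | none => (none, none)
  | some y => (some y.1, some (pvArea y.2))

theorem pv_inner_eq_min (eid : String) (c : List (String × Int))
    (l : List (String × List (String × Int))) (st : Option (String × List (String × Int))) :
    l.foldl (pvBestStep eid c) (pvPack st) =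
      pvPack (l.foldl
        (pvMinStep (fun o => !(o.1 == eid) && pvIsInside c o.2)
          (fun o => pvArea o.2)) st) := by
  induction l generalizing st with
  | nil => rfl
  | cons x t ih =>
    have hstep : pvBestStep eid c (pvPack st) x =
        pvPack (pvMinStep (fun o => !(o.1 == eid) && pvIsInside c o.2)
          (fun o => pvArea o.2) st x) := by
      by_cases he : x.1 == eid
      · simp [pvBestStep, pvMinStep, he]
      · by_cases hin : pvIsInside c x.2
        · cases st with
          | none => simp [pvBestStep, pvMinStep, pvArea, he, hin, pvPack]
          | some y =>
            by_cases hlt : pvGet x.2 "w" * pvGet x.2 "h" < pvGet y.2 "w" * pvGet y.2 "h" <;>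
              simp [pvBestStep, pvMinStep, pvArea, he, hin, hlt, pvPack]
        · cases st with
          | none => simp [pvBestStep, pvMinStep, he, hin, pvPack]
          | some y => simp [pvBestStep, pvMinStep, he, hin, pvPack]
    rw [List.foldl_cons, List.foldl_cons, hstep, ih]

-- min over a list with one element appended = one strict-< update of the old min
theorem pv_min?_append_singleton {α : Type} (key : α → Int) (l : List α) (x : α) :
    PySem.List.min? (l ++ [x]) key =
      match PySem.List.min? l key with
      | none => some x
      | some m => if key x < key m then some x else some m := by
  simp only [PySem.List.min?, List.foldl_append, List.foldl_cons, List.foldl_nil]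
  cases (List.foldl
      (fun acc y =>
        match acc with
        | none => some y
        | some m => if key y < key m then some y else some m)
      none l) <;> rfl

-- find? through one insertion into a key-sorted list
theorem pv_find?_insertBy {α : Type} (key : α → Int) (p : α → Bool) (x : α) (ys : List α)
    (h : ys.Pairwise (fun a b => key a ≤ key b)) :
    (PySem.List.insertBy (fun a b => decide (key a < key b)) x ys).find? p =
      match ys.find? p with
      | none => if p x then some x else none
      | some m => if p x && decide (key x < key m) then some x else some m := by
  induction ys with
  | nil => by_cases hp : p x <;> simp [PySem.List.insertBy, List.find?, hp]
  | cons y t ih =>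
    rw [List.pairwise_cons] at h
    obtain ⟨hy, ht⟩ := h
    have hcons : PySem.List.insertBy (fun a b => decide (key a < key b)) x (y :: t) =
        if decide (key x < key y) then x :: y :: t
        else y :: PySem.List.insertBy (fun a b => decide (key a < key b)) x t := rfl
    rw [hcons]
    by_cases hlt : key x < key y
    · simp only [hlt, decide_true, if_true]
      cases hfind : (y :: t).find? p with
      | none =>
        have hpy : p y = false := by
          cases hpy : p y
          · rfl
          · rw [List.find?_cons_of_pos hpy] at hfind; exact absurd hfind (by simp)
        by_cases hp : p x <;> simp [hp, hfind]
      | some m =>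
        have hm : m ∈ y :: t := List.mem_of_find?_eq_some hfind
        have hkm : key x < key m := by
          rcases List.mem_cons.mp hm with rfl | hmt
          · exact hlt
          · exact lt_of_lt_of_le hlt (hy m hmt)
        by_cases hp : p x <;> simp [hp, hfind, hkm]
    · rw [if_neg (by simp [hlt])]
      by_cases hpy : p y
      · simp [List.find?_cons_of_pos hpy, hlt]
      · simp only [List.find?_cons_of_neg (by simp [hpy] : ¬ p y = true)]
        exact ih ht

-- first match in the area-sorted list = first area-minimum of the matches in original order
theorem pv_find?_sorted {α : Type} (key : α → Int) (p : α → Bool) (xs : List α) :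
    (PySem.List.sorted xs key).find? p = PySem.List.min? (xs.filter p) key := by
  induction xs using List.reverseRecOn with
  | nil => rfl
  | append_singleton xs x ih =>
    have hsorted : PySem.List.sorted (xs ++ [x]) key =
        PySem.List.insertBy (fun a b => decide (key a < key b)) x
          (PySem.List.sorted xs key) := by
      simp [PySem.List.sorted, List.foldl_append]
    rw [hsorted,
      pv_find?_insertBy key p x _ (PySem.List.sorted_pairwise xs key), ih,
      List.filter_append]
    by_cases hp : p x
    · simp only [List.filter_cons, List.filter_nil, hp, if_true,
        pv_min?_append_singleton]
      cases PySem.List.min? (xs.filter p) key with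
      | none => simp
      | some m => simp
    · simp only [List.filter_cons, List.filter_nil, hp, Bool.false_eq_true, if_false, List.append_nil]
      cases PySem.List.min? (xs.filter p) key with
      | none => simp
      | some m => simp

-- per element: A's best_parent is the first containing box of B's area-sorted list
theorem pv_entry_eq (coordinates : List (String × List (String × Int)))
    (it : String × List (String × Int)) :
    (coordinates.foldl (pvBestStep it.1 it.2) (none, none)).1 =
      (((PySem.List.sorted coordinates (fun kv => pvArea kv.2)).find?
          (fun kv => !(kv.1 == it.1) && pvIsInside it.2 kv.2)).map (fun kv => kv.1)) := by
  rw [show ((none, none) : Option String × Option Int) = pvPack none from rfl,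
    pv_inner_eq_min it.1 it.2 coordinates none,
    pv_find?_sorted (fun kv => pvArea kv.2)
      (fun kv => !(kv.1 == it.1) && pvIsInside it.2 kv.2) coordinates]
  have hmin : coordinates.foldl
      (pvMinStep (fun o => !(o.1 == it.1) && pvIsInside it.2 o.2)
        (fun o => pvArea o.2)) none =
      PySem.List.min?
        (coordinates.filter (fun kv => !(kv.1 == it.1) && pvIsInside it.2 kv.2))
        (fun kv => pvArea kv.2) := by
    unfold pvMinStep
    rw [PySem.List.foldl_if_eq_foldl_filter]
    rfl
  rw [hmin]
  cases PySem.List.min?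
      (coordinates.filter (fun kv => !(kv.1 == it.1) && pvIsInside it.2 kv.2))
      (fun kv => pvArea kv.2) <;> rfl

-- ===== VERDICT (by name: the statement is the Claim_ definition above) =====
theorem build_nesting_tree_spec : Claim_equal_build_nesting_tree := by
  intro coordinates _ _
  show build_nesting_tree coordinates = build_nesting_tree_alt coordinates
  unfold build_nesting_tree build_nesting_tree_alt
  congr 1
  apply PySem.List.foldl_congr_mem
  intro pm it _
  simp only
  rw [PySem.Dict.insert_insert_self, pv_entry_eq coordinates it]
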